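-- pv_equiv track=rewrite | github.com/AMartsinkevich/it-academy | homework/06/home_work_06_08.py | min_max_matrix
-- ===== SOURCE A (Python) =====
-- def min_max_matrix(matrix: list[list[int]]) -> int:
--     '''Find minimum and maximum element in matrix'''
--
--     min = max = matrix[0][0]
--     i_min = j_min = i_max = j_max = 0
--     for i, row in enumerate(matrix):
--         for j, col in enumerate(row):
--             if matrix[i][j] < min:
--                 min = matrix[i][j]
--                 i_min = i
--                 j_min = j
--             if matrix[i][j] > max:
--                 max = matrix[i][j]
--                 i_max = i
--                 j_max = j
--
--     return min, i_min, j_min, max, i_max, j_max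
-- ===== SOURCE B (Python) =====
-- def min_max_matrix(matrix: list[list[int]]) -> int:
--     '''Find minimum and maximum element in matrix'''
--     entries = [(v, i, j) for i, row in enumerate(matrix) for j, v in enumerate(row)]
--     lo = min(entries, key=lambda e: e[0])
--     hi = max(entries, key=lambda e: e[0])
--     return lo[0], lo[1], lo[2], hi[0], hi[1], hi[2]
-- ===== Notes on version B (the rewrite author's own statement) =====
-- stated objective: idiomatic
-- what changed: B flattens the matrix once into (value,i,j) entries and obtains both answers with the builtin min/max (key on the value, which return the first extremal entry), instead of A's hand-rolled nested loops threading six mutable variables with repeated matrix[i][j] re-indexing.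
import Mathlib
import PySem

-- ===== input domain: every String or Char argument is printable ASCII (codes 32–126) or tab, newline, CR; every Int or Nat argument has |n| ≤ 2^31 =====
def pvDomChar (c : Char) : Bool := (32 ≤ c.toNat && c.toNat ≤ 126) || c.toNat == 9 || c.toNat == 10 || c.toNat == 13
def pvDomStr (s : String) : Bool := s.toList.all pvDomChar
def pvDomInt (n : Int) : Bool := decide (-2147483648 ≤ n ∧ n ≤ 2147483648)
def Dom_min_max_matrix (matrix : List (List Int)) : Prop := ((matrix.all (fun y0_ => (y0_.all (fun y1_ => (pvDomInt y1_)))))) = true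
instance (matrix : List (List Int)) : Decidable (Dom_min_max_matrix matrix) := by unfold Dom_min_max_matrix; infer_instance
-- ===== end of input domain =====

-- B flattens the matrix once into (value, i, j) entries and reads both answers off the
-- builtin first-extremal min/max with a value key, instead of A's nested loops threading
-- six mutable variables; objective: idiomatic (same asymptotic cost).

-- ===== PORT A =====
-- matrix[i][j] inside the loop: i, j come from enumerate so the index is always in range;
-- pyGetD's defaults are never consulted (exact).
def min_max_matrix (matrix : List (List Int)) : Int × Int × Int × Int × Int × Int :=
  match PySem.List.pyGet? matrix 0 with
  | none => (0, 0, 0, 0, 0, 0)   -- Python raises IndexError here; outside Pre_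
  | some row0 =>
    match PySem.List.pyGet? row0 0 with
    | none => (0, 0, 0, 0, 0, 0) -- Python raises IndexError here; outside Pre_
    | some v0 =>
      (PySem.List.enumerate matrix 0).foldl
        (fun s p =>
          (PySem.List.enumerate p.2 0).foldl
            (fun s q =>
              let v := PySem.List.pyGetD (PySem.List.pyGetD matrix p.1 []) q.1 0
              let s1 := if v < s.1 then (v, p.1, q.1, s.2.2.2) else s
              if s1.2.2.2.1 < v then (s1.1, s1.2.1, s1.2.2.1, v, p.1, q.1) else s1)
            s)
        (v0, 0, 0, v0, 0, 0)

-- ===== PORT B =====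
def min_max_matrix_alt (matrix : List (List Int)) : Int × Int × Int × Int × Int × Int :=
  let entries := (PySem.List.enumerate matrix 0).flatMap
    (fun p => (PySem.List.enumerate p.2 0).map (fun q => (q.2, p.1, q.1)))
  match PySem.List.min? entries (fun e => e.1), PySem.List.max? entries (fun e => e.1) with
  | some lo, some hi => (lo.1, lo.2.1, lo.2.2, hi.1, hi.2.1, hi.2.2)
  | _, _ => (0, 0, 0, 0, 0, 0)   -- Python raises ValueError (min of empty sequence); outside Pre_

-- ===== PRECONDITION & SPEC =====
-- Pre_ excludes exactly the inputs where the Python A raises IndexError on its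
-- matrix[0][0] seed: an empty matrix or a matrix whose first row is empty.
def Pre_min_max_matrix (matrix : List (List Int)) : Prop := matrix.headD [] ≠ []
instance (matrix : List (List Int)) : Decidable (Pre_min_max_matrix matrix) := by unfold Pre_min_max_matrix; infer_instance
def pvWitness_min_max_matrix : List (List Int) := [[3, -1], [7, 0]]

def Spec_min_max_matrix (matrix : List (List Int)) (out : Int × Int × Int × Int × Int × Int) : Prop := out = min_max_matrix_alt matrix
instance (matrix : List (List Int)) (out : Int × Int × Int × Int × Int × Int) : Decidable (Spec_min_max_matrix matrix out) := by unfold Spec_min_max_matrix; infer_instance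

-- ===== CLAIM (what is proved, stated in full; the proofs are below) =====
def Claim_equal_min_max_matrix : Prop := ∀ (matrix : List (List Int)), Dom_min_max_matrix matrix → Pre_min_max_matrix matrix → Spec_min_max_matrix matrix (min_max_matrix matrix)

-- ===== LEMMAS AND PROOFS =====

def pvEntries (matrix : List (List Int)) : List (Int × Int × Int) :=
  (PySem.List.enumerate matrix 0).flatMap
    (fun p => (PySem.List.enumerate p.2 0).map (fun q => (q.2, p.1, q.1)))

/-- A's loop body, with the in-range indexing already replaced by the entry's value. -/
def pvStep (s : Int × Int × Int × Int × Int × Int) (e : Int × Int × Int) :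
    Int × Int × Int × Int × Int × Int :=
  let s1 := if e.1 < s.1 then (e.1, e.2.1, e.2.2, s.2.2.2) else s
  if s1.2.2.2.1 < e.1 then (s1.1, s1.2.1, s1.2.2.1, e.1, e.2.1, e.2.2) else s1

def pvMin (m e : Int × Int × Int) : Int × Int × Int := if e.1 < m.1 then e else m
def pvMax (m e : Int × Int × Int) : Int × Int × Int := if m.1 < e.1 then e else m

lemma pvStep_split (a b : Int × Int × Int) (e : Int × Int × Int) :
    pvStep (a.1, a.2.1, a.2.2, b.1, b.2.1, b.2.2) e =
      ((pvMin a e).1, (pvMin a e).2.1, (pvMin a e).2.2,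
       (pvMax b e).1, (pvMax b e).2.1, (pvMax b e).2.2) := by
  simp only [pvStep, pvMin, pvMax]
  split_ifs <;> simp_all

lemma pvFold_split (xs : List (Int × Int × Int)) :
    ∀ a b : Int × Int × Int,
      xs.foldl pvStep (a.1, a.2.1, a.2.2, b.1, b.2.1, b.2.2) =
        ((xs.foldl pvMin a).1, (xs.foldl pvMin a).2.1, (xs.foldl pvMin a).2.2,
         (xs.foldl pvMax b).1, (xs.foldl pvMax b).2.1, (xs.foldl pvMax b).2.2) := by
  induction xs with
  | nil => intro a b; simp
  | cons x t ih =>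
      intro a b
      simp only [List.foldl_cons, pvStep_split]
      exact ih (pvMin a x) (pvMax b x)

lemma pvMin?Eq (xs : List (Int × Int × Int)) :
    ∀ a : Int × Int × Int,
      PySem.List.min? (a :: xs) (fun e => e.1) = some (xs.foldl pvMin a) := by
  induction xs with
  | nil => intro a; simp [PySem.List.min?]
  | cons x t ih =>
      intro a
      have h : PySem.List.min? (a :: x :: t) (fun e => e.1) =
          PySem.List.min? (pvMin a x :: t) (fun e => e.1) := by
        simp only [PySem.List.min?, List.foldl_cons, pvMin]
        by_cases h : x.1 < a.1 <;> simp [h]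
      rw [h, ih, List.foldl_cons]

lemma pvMax?Eq (xs : List (Int × Int × Int)) :
    ∀ a : Int × Int × Int,
      PySem.List.max? (a :: xs) (fun e => e.1) = some (xs.foldl pvMax a) := by
  induction xs with
  | nil => intro a; simp [PySem.List.max?]
  | cons x t ih =>
      intro a
      have h : PySem.List.max? (a :: x :: t) (fun e => e.1) =
          PySem.List.max? (pvMax a x :: t) (fun e => e.1) := by
        simp only [PySem.List.max?, List.foldl_cons, pvMax]
        by_cases h : a.1 < x.1 <;> simp [h]
      rw [h, ih, List.foldl_cons]

/-- A's nested loop equals the single fold of `pvStep` over the flattened entries. -/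
lemma pvA_fold (matrix : List (List Int)) (init : Int × Int × Int × Int × Int × Int) :
    (PySem.List.enumerate matrix 0).foldl
      (fun s p =>
        (PySem.List.enumerate p.2 0).foldl
          (fun s q =>
            let v := PySem.List.pyGetD (PySem.List.pyGetD matrix p.1 []) q.1 0
            let s1 := if v < s.1 then (v, p.1, q.1, s.2.2.2) else s
            if s1.2.2.2.1 < v then (s1.1, s1.2.1, s1.2.2.1, v, p.1, q.1) else s1)
          s)
      init = (pvEntries matrix).foldl pvStep init := by
  rw [pvEntries, List.foldl_flatMap]
  apply PySem.List.foldl_congr_mem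
  intro acc p hp
  rw [List.foldl_map]
  apply PySem.List.foldl_congr_mem
  intro acc' q hq
  rcases (PySem.List.mem_enumerate_iff _ _ _).1 hp with ⟨k, hk, rfl⟩
  rcases (PySem.List.mem_enumerate_iff _ _ _).1 hq with ⟨j, hj, rfl⟩
  simp only [zero_add] at hj ⊢
  simp only [pvStep, PySem.List.pyGetD_natCast, List.getD_eq_getElem?_getD,
    List.getElem?_eq_getElem hk, Option.getD_some]
  simp only [List.getElem?_eq_getElem hj, Option.getD_some]

-- ===== VERDICT (by name: the statement is the Claim_ definition above) =====
theorem min_max_matrix_spec : Claim_equal_min_max_matrix := by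
  intro matrix _ hpre
  unfold Spec_min_max_matrix
  obtain ⟨row0, rest, rfl⟩ : ∃ r t, matrix = r :: t := by
    cases matrix with
    | nil => exact absurd rfl hpre
    | cons r t => exact ⟨r, t, rfl⟩
  obtain ⟨v0, tl, rfl⟩ : ∃ v tl, row0 = v :: tl := by
    cases row0 with
    | nil => exact absurd rfl hpre
    | cons v tl => exact ⟨v, tl, rfl⟩
  show min_max_matrix _ = min_max_matrix_alt _
  rw [min_max_matrix, min_max_matrix_alt]
  have hget : PySem.List.pyGet? ((v0 :: tl) :: rest) 0 = some (v0 :: tl) := by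
    simp [PySem.List.pyGet?, PySem.List.pyIdx?]
  have hget2 : PySem.List.pyGet? (v0 :: tl) 0 = some v0 := by
    simp [PySem.List.pyGet?, PySem.List.pyIdx?]
  simp only [hget, hget2]
  rw [pvA_fold]
  -- the flattened entries start with (v0, 0, 0)
  obtain ⟨es, hes⟩ : ∃ es, pvEntries ((v0 :: tl) :: rest) = (v0, 0, 0) :: es := by
    refine ⟨((PySem.List.enumerate tl 1).map fun q => (q.2, (0 : Int), q.1)) ++
      (PySem.List.enumerate rest 1).flatMap
        (fun p => (PySem.List.enumerate p.2 0).map (fun q => (q.2, p.1, q.1))), ?_⟩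
    simp [pvEntries, PySem.List.enumerate_cons]
  rw [show (List.flatMap (fun p => List.map (fun q => (q.2, p.1, q.1)) (PySem.List.enumerate p.2 0))
        (PySem.List.enumerate ((v0 :: tl) :: rest) 0)) = pvEntries ((v0 :: tl) :: rest) from rfl]
  rw [hes]
  -- A: the first entry (v0,0,0) leaves the seed state unchanged
  have hfirst : pvStep (v0, 0, 0, v0, 0, 0) (v0, 0, 0) = (v0, 0, 0, v0, 0, 0) := by
    simp [pvStep]
  rw [List.foldl_cons, hfirst,
    pvFold_split es ((v0, 0, 0) : Int × Int × Int) ((v0, 0, 0) : Int × Int × Int)]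
  -- B: min?/max? over the entries are the same running folds seeded with the head
  rw [pvMin?Eq, pvMax?Eq]
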